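-- pv_equiv track=rewrite | github.com/Connor-OS/AoC_2023 | day_2.py | calculate_power
-- ===== SOURCE A (Python) =====
-- def calculate_power(line):
--     red_power = 0
--     green_power = 0
--     blue_power = 0
--     for string in line:
--         if "red" in string:
--             string = string.strip(" red")
--             if int(string) > red_power:
--                 red_power = int(string)
--
--         if "green" in string:
--             string = string.strip(" green")
--             if int(string) > green_power:
--                 green_power = int(string)
--
--         if "blue" in string:
--             string = string.strip(" blue")
--             if int(string) > blue_power:
--                 blue_power = int(string)
--
--     return red_power * green_power * blue_power
-- ===== SOURCE B (Python) =====
-- def calculate_power(line):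
--     def color_max(word):
--         return max([0] + [int(s.strip(" " + word)) for s in line if word in s])
--     return color_max("red") * color_max("green") * color_max("blue")
-- ===== Notes on version B (the rewrite author's own statement) =====
-- stated objective: simpler
-- what changed: A's single stateful pass (three running maxima, with the loop variable destructively re-stripped so later color checks see the stripped string) is replaced by three independent per-color scans, each a max-of-comprehension over the original strings with 0 prepended, multiplied at the end.
import Mathlib
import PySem

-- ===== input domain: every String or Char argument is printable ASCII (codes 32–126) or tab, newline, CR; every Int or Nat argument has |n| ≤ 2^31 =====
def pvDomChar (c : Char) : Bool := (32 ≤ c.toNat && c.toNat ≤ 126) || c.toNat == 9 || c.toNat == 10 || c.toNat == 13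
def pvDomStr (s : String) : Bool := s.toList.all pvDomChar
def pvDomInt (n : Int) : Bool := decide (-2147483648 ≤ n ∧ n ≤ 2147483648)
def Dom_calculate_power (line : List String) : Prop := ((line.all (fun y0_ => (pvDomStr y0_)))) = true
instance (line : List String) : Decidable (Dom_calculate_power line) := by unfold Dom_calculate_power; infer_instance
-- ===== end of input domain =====

-- B replaces A's single mutating pass (three running maxima, the loop variable re-stripped in place)
-- by three independent per-color max-of-comprehension scans; objective: simpler.

-- ===== PORT A =====
-- one iteration of A's loop body over the state (red_power, green_power, blue_power);
-- `int(string)` is `(PySem.Int.ofStr? …).getD 0`: the `none` (ValueError) case is excluded by Pre_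
def pvStepA (acc : Int × Int × Int) (s0 : String) : Int × Int × Int :=
  let r := acc.1
  let g := acc.2.1
  let b := acc.2.2
  -- if "red" in string: string = string.strip(" red"); if int(string) > red_power: red_power = int(string)
  let p1 : String × Int :=
    if PySem.Str.isIn "red" s0 then
      let s := PySem.Str.stripChars s0 " red"
      let v := (PySem.Int.ofStr? s).getD 0
      (s, if v > r then v else r)
    else (s0, r)
  -- if "green" in string: string = string.strip(" green"); …
  let p2 : String × Int :=
    if PySem.Str.isIn "green" p1.1 then
      let s := PySem.Str.stripChars p1.1 " green"
      let v := (PySem.Int.ofStr? s).getD 0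
      (s, if v > g then v else g)
    else (p1.1, g)
  -- if "blue" in string: string = string.strip(" blue"); …
  let b' : Int :=
    if PySem.Str.isIn "blue" p2.1 then
      let s := PySem.Str.stripChars p2.1 " blue"
      let v := (PySem.Int.ofStr? s).getD 0
      if v > b then v else b
    else b
  (p1.2, p2.2, b')

def calculate_power (line : List String) : Int :=
  let acc := line.foldl pvStepA (0, 0, 0)
  acc.1 * acc.2.1 * acc.2.2

-- ===== PORT B =====
-- max([0] + [int(s.strip(" " + word)) for s in line if word in s])
def pvColorMax (line : List String) (word : String) : Int :=
  (PySem.List.max?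
    (0 :: (line.filter (fun s => PySem.Str.isIn word s)).map
      (fun s => (PySem.Int.ofStr? (PySem.Str.stripChars s (" " ++ word))).getD 0))
    (fun x => x)).getD 0

def calculate_power_alt (line : List String) : Int :=
  pvColorMax line "red" * pvColorMax line "green" * pvColorMax line "blue"

-- ===== PRECONDITION & SPEC =====
-- Pre_ admits exactly the inputs on which A returns (no ValueError from int()): wherever a color word
-- occurs in a string, the stripped string must parse as an int.  The `isIn … = false` conjuncts are
-- automatically true whenever that parse succeeds (an int()-parseable string contains no letters);
-- they are stated explicitly only because the proof uses them, and exclude no further input.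
def Pre_calculate_power (line : List String) : Prop :=
  ∀ s ∈ line,
    (PySem.Str.isIn "red" s = true →
       (PySem.Int.ofStr? (PySem.Str.stripChars s " red")).isSome = true ∧
       PySem.Str.isIn "green" (PySem.Str.stripChars s " red") = false ∧
       PySem.Str.isIn "blu" (PySem.Str.stripChars s " red") = false) ∧
    (PySem.Str.isIn "green" s = true →
       (PySem.Int.ofStr? (PySem.Str.stripChars s " green")).isSome = true ∧
       PySem.Str.isIn "blu" (PySem.Str.stripChars s " green") = false) ∧
    (PySem.Str.isIn "blue" s = true →
       (PySem.Int.ofStr? (PySem.Str.stripChars s " blue")).isSome = true)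

instance (line : List String) : Decidable (Pre_calculate_power line) := by
  unfold Pre_calculate_power; infer_instance

def pvWitness_calculate_power : List String := ["3 red", "5 green", "-1 blue", "scores"]

def Spec_calculate_power (line : List String) (out : Int) : Prop := out = calculate_power_alt line
instance (line : List String) (out : Int) : Decidable (Spec_calculate_power line out) := by unfold Spec_calculate_power; infer_instance

-- ===== CLAIM (what is proved, stated in full; the proofs are below) =====
def Claim_equal_calculate_power : Prop := ∀ (line : List String), Dom_calculate_power line → Pre_calculate_power line → Spec_calculate_power line (calculate_power line)

-- ===== LEMMAS AND PROOFS =====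

-- the per-color value a string contributes
def pvVal (s chars : String) : Int := (PySem.Int.ofStr? (PySem.Str.stripChars s chars)).getD 0

-- Pre_'s clause for one string, in the `Chars`-level normal form the proofs work in
-- (definitionally equal to the corresponding clause of Pre_calculate_power)
def pvPreClause (s : String) : Prop :=
  (PySem.Chars.isIn ['r','e','d'] s.toList = true →
     (PySem.Int.ofStr? (PySem.Str.stripChars s " red")).isSome = true ∧
     PySem.Chars.isIn ['g','r','e','e','n'] (PySem.Chars.stripChars s.toList [' ','r','e','d']) = false ∧
     PySem.Chars.isIn ['b','l','u'] (PySem.Chars.stripChars s.toList [' ','r','e','d']) = false) ∧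
  (PySem.Chars.isIn ['g','r','e','e','n'] s.toList = true →
     (PySem.Int.ofStr? (PySem.Str.stripChars s " green")).isSome = true ∧
     PySem.Chars.isIn ['b','l','u'] (PySem.Chars.stripChars s.toList [' ','g','r','e','e','n']) = false) ∧
  (PySem.Chars.isIn ['b','l','u','e'] s.toList = true →
     (PySem.Int.ofStr? (PySem.Str.stripChars s " blue")).isSome = true)

-- an infix whose first character the predicate rejects survives dropWhile
lemma pv_dropWhile_infix (p : Char → Bool) (c : Char) (t l : List Char)
    (hc : p c = false) (h : (c :: t) <:+: l) : (c :: t) <:+: l.dropWhile p := by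
  obtain ⟨a, b, rfl⟩ := h
  induction a with
  | nil => simpa [List.dropWhile, hc] using List.infix_append [] (c :: t) b
  | cons x a ih =>
    by_cases hx : p x = true
    · simpa [List.dropWhile, hx] using ih
    · rw [List.cons_append, List.cons_append, List.dropWhile_cons, if_neg hx]
      exact ⟨x :: a, b, by simp⟩

-- an infix whose first and last characters are not in the strip set survives str.strip(chars)
lemma pv_stripChars_infix (chars : List Char) (c d : Char) (mid s : List Char)
    (hc : chars.contains c = false) (hd : chars.contains d = false)
    (h : (c :: (mid ++ [d])) <:+: s) :
    (c :: (mid ++ [d])) <:+: PySem.Chars.stripChars s chars := by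
  unfold PySem.Chars.stripChars
  have h1 := pv_dropWhile_infix (fun x => chars.contains x) c (mid ++ [d]) s hc h
  have h2 : (d :: (mid.reverse ++ [c])) <:+: (List.dropWhile (fun x => chars.contains x) s).reverse := by
    have := List.reverse_infix.mpr h1
    simpa using this
  have h3 := pv_dropWhile_infix (fun x => chars.contains x) d (mid.reverse ++ [c]) _ hd h2
  have h4 := List.reverse_infix.mpr h3
  simpa using h4

-- "green" in s → "green" in s.strip(" red")  ('g','n' are not in the strip set)
lemma pv_green_strip_red (s : List Char) (h : PySem.Chars.isIn ['g','r','e','e','n'] s = true) :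
    PySem.Chars.isIn ['g','r','e','e','n'] (PySem.Chars.stripChars s [' ','r','e','d']) = true := by
  rw [PySem.Chars.isIn_iff_infix] at h ⊢
  have e : (['g','r','e','e','n'] : List Char) = 'g' :: (['r','e','e'] ++ ['n']) := rfl
  rw [e] at h ⊢
  exact pv_stripChars_infix _ 'g' 'n' _ _ (by decide) (by decide) h

-- "blu" in s → "blu" in s.strip(chars)  for chars = " red" / " green" ('b','u' not in either set)
lemma pv_blu_strip (chars : List Char)
    (hch : chars = [' ','r','e','d'] ∨ chars = [' ','g','r','e','e','n'])
    (s : List Char) (h : PySem.Chars.isIn ['b','l','u'] s = true) :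
    PySem.Chars.isIn ['b','l','u'] (PySem.Chars.stripChars s chars) = true := by
  rw [PySem.Chars.isIn_iff_infix] at h ⊢
  have e : (['b','l','u'] : List Char) = 'b' :: (['l'] ++ ['u']) := rfl
  rw [e] at h ⊢
  rcases hch with rfl | rfl
  · exact pv_stripChars_infix _ 'b' 'u' _ _ (by decide) (by decide) h
  · exact pv_stripChars_infix _ 'b' 'u' _ _ (by decide) (by decide) h

-- "blue" in l → "blu" in l
lemma pv_blu_of_blue (l : List Char) (h : PySem.Chars.isIn ['b','l','u','e'] l = true) :
    PySem.Chars.isIn ['b','l','u'] l = true := by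
  rw [PySem.Chars.isIn_iff_infix] at h ⊢
  exact (show (['b','l','u'] : List Char) <:+: ['b','l','u','e'] by decide).trans h

lemma pv_if_max (r v : Int) : (if v > r then v else r) = max r v := by
  by_cases h : v > r
  · rw [if_pos h, max_eq_right h.le]
  · rw [if_neg h, max_eq_left (not_lt.mp h)]

-- under its Pre_ clause, one step of A's loop updates the three maxima independently,
-- each guarded by the color word's presence in the ORIGINAL string
lemma pv_step_eq (s : String) (hs : pvPreClause s) (r g b : Int) :
    pvStepA (r, g, b) s =
      ((if PySem.Chars.isIn ['r','e','d'] s.toList then max r (pvVal s " red") else r),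
       (if PySem.Chars.isIn ['g','r','e','e','n'] s.toList then max g (pvVal s " green") else g),
       (if PySem.Chars.isIn ['b','l','u','e'] s.toList then max b (pvVal s " blue") else b)) := by
  obtain ⟨hR, hG, hB⟩ := hs
  by_cases hr : PySem.Chars.isIn ['r','e','d'] s.toList = true
  · obtain ⟨-, hG1, hBlu1⟩ := hR hr
    have hGs : PySem.Chars.isIn ['g','r','e','e','n'] s.toList = false := by
      by_contra hx
      rw [Bool.not_eq_false] at hx
      rw [pv_green_strip_red s.toList hx] at hG1
      cases hG1
    have hBl1 : PySem.Chars.isIn ['b','l','u','e'] (PySem.Chars.stripChars s.toList [' ','r','e','d']) = false := by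
      by_contra hx
      rw [Bool.not_eq_false] at hx
      rw [pv_blu_of_blue _ hx] at hBlu1
      cases hBlu1
    have hBls : PySem.Chars.isIn ['b','l','u','e'] s.toList = false := by
      by_contra hx
      rw [Bool.not_eq_false] at hx
      rw [pv_blu_strip [' ','r','e','d'] (Or.inl rfl) s.toList (pv_blu_of_blue _ hx)] at hBlu1
      cases hBlu1
    simp [pvStepA, pvVal, PySem.Str.isIn, hr, hG1, hBl1, hGs, hBls, pv_if_max]
  · by_cases hg : PySem.Chars.isIn ['g','r','e','e','n'] s.toList = true
    · obtain ⟨-, hBlu2⟩ := hG hg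
      have hBl2 : PySem.Chars.isIn ['b','l','u','e'] (PySem.Chars.stripChars s.toList [' ','g','r','e','e','n']) = false := by
        by_contra hx
        rw [Bool.not_eq_false] at hx
        rw [pv_blu_of_blue _ hx] at hBlu2
        cases hBlu2
      have hBls : PySem.Chars.isIn ['b','l','u','e'] s.toList = false := by
        by_contra hx
        rw [Bool.not_eq_false] at hx
        rw [pv_blu_strip [' ','g','r','e','e','n'] (Or.inr rfl) s.toList (pv_blu_of_blue _ hx)] at hBlu2
        cases hBlu2
      simp [pvStepA, pvVal, PySem.Str.isIn, hr, hg, hBl2, hBls, pv_if_max]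
    · by_cases hb : PySem.Chars.isIn ['b','l','u','e'] s.toList = true
      · simp [pvStepA, pvVal, PySem.Str.isIn, hr, hg, hb, pv_if_max]
      · simp [pvStepA, PySem.Str.isIn, hr, hg, hb]

-- the list of parsed values B collects for one color word
def pvVals (line : List String) (w chars : String) : List Int :=
  (line.filter (fun s => PySem.Str.isIn w s)).map (fun s => pvVal s chars)

-- A's fold computes, componentwise, the running maxima of B's three per-color value lists
lemma pv_fold_eq (line : List String) (hpre : ∀ s ∈ line, pvPreClause s) (r g b : Int) :
    line.foldl pvStepA (r, g, b) =
      ((pvVals line "red" " red").foldl max r,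
       (pvVals line "green" " green").foldl max g,
       (pvVals line "blue" " blue").foldl max b) := by
  induction line generalizing r g b with
  | nil => simp [pvVals]
  | cons s rest ih =>
    have hs := hpre s (List.mem_cons_self ..)
    have hrest : ∀ s' ∈ rest, pvPreClause s' := fun s' h' => hpre s' (List.mem_cons_of_mem _ h')
    rw [List.foldl_cons, pv_step_eq s hs r g b, ih hrest]
    unfold pvVals
    by_cases h1 : PySem.Chars.isIn ['r','e','d'] s.toList = true <;>
      by_cases h2 : PySem.Chars.isIn ['g','r','e','e','n'] s.toList = true <;>
        by_cases h3 : PySem.Chars.isIn ['b','l','u','e'] s.toList = true <;>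
          simp [PySem.Str.isIn, h1, h2, h3]

-- Pre_'s Str-level clause implies its Chars-level normal form
lemma pv_pre_bridge (s : String)
    (h : (PySem.Str.isIn "red" s = true →
            (PySem.Int.ofStr? (PySem.Str.stripChars s " red")).isSome = true ∧
            PySem.Str.isIn "green" (PySem.Str.stripChars s " red") = false ∧
            PySem.Str.isIn "blu" (PySem.Str.stripChars s " red") = false) ∧
         (PySem.Str.isIn "green" s = true →
            (PySem.Int.ofStr? (PySem.Str.stripChars s " green")).isSome = true ∧
            PySem.Str.isIn "blu" (PySem.Str.stripChars s " green") = false) ∧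
         (PySem.Str.isIn "blue" s = true →
            (PySem.Int.ofStr? (PySem.Str.stripChars s " blue")).isSome = true)) :
    pvPreClause s := by
  unfold pvPreClause
  simpa [PySem.Str.isIn, PySem.Str.toList_stripChars] using h

lemma pv_colorMax_eq (line : List String) (w chars : String) (hw : (" " ++ w : String) = chars) :
    pvColorMax line w = (pvVals line w chars).foldl max 0 := by
  unfold pvColorMax pvVals pvVal
  rw [hw, PySem.List.max?_id_cons]
  rfl

-- ===== VERDICT (by name: the statement is the Claim_ definition above) =====
theorem calculate_power_spec : Claim_equal_calculate_power := by
  intro line _ hpre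
  unfold Spec_calculate_power calculate_power calculate_power_alt
  rw [pv_fold_eq line (fun s h => pv_pre_bridge s (hpre s h)) 0 0 0,
      pv_colorMax_eq line "red" " red" rfl,
      pv_colorMax_eq line "green" " green" rfl,
      pv_colorMax_eq line "blue" " blue" rfl]
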